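-- pv_equiv track=rewrite | github.com/pa-vpap/toy-protocols | C/protocol_c.py | default_rebin_edges
-- ===== SOURCE A (Python) =====
-- from typing import Dict, List, Tuple, Optional
--
-- def default_rebin_edges(N: int, k_cap: int) -> List[Tuple[int, int]]:
--     """
--     Tail-stable binning:
--       - exact bins 0..20
--       - then coarse bins increasing roughly logarithmically up to min(N, k_cap)
--     """
--     hi = min(N, k_cap)
--     edges: List[Tuple[int, int]] = [(k, k) for k in range(0, min(21, hi + 1))]
--     if hi <= 20:
--         return edges
--
--     tail = [(21, 30), (31, 45), (46, 70), (71, 110), (111, 170), (171, 260), (261, hi)]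
--     for a, b in tail:
--         if a > hi:
--             break
--         edges.append((a, min(b, hi)))
--     # Ensure last bin ends exactly at hi
--     if edges[-1][1] != hi:
--         edges[-1] = (edges[-1][0], hi)
--     return edges
-- ===== SOURCE B (Python) =====
-- def _start(hi):
--     # start of the bin that contains hi
--     if hi <= 20:
--         return hi
--     s = 21
--     for a in (31, 46, 71, 111, 171, 261):
--         if a <= hi:
--             s = a
--     return s
--
-- def _bins(hi):
--     # all bins up to hi, built back-to-front by recursion on the containing bin
--     if hi < 0:
--         return []
--     s = _start(hi)
--     return _bins(s - 1) + [(s, hi)]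
--
-- def default_rebin_edges(N, k_cap):
--     return _bins(min(N, k_cap))
-- ===== Notes on version B (the rewrite author's own statement) =====
-- stated objective: alternative
-- what changed: Replaces A's forward two-phase construction (singleton comprehension for 0..20, hardcoded tail pair loop with break, last-bin fixup) with a backward recursion: compute the start of the bin containing hi from the boundary set, recurse on start-1, and append (start, hi), so bins are derived top-down from hi instead of accumulated bottom-up from a table of (a,b) pairs.
import Mathlib
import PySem

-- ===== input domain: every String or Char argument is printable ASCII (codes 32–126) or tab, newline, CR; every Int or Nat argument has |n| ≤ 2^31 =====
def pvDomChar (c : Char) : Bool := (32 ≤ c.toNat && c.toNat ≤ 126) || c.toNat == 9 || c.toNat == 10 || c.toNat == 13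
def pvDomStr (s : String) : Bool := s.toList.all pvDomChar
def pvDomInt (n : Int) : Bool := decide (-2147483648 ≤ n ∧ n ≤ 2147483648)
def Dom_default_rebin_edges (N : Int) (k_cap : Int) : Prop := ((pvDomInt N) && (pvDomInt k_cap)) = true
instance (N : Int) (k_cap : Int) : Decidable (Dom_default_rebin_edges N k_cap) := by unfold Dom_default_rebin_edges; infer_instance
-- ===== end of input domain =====

-- B builds the bins back-to-front by recursion on the bin containing hi (start from a boundary
-- scan, recurse on start-1), instead of A's forward table-driven accumulation (objective: alternative).


-- ===== PORT A =====
-- A's tail loop with break, carried accumulator = edges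
def pvLoopA (tail : List (Int × Int)) (hi : Int) (edges : List (Int × Int)) : List (Int × Int) :=
  match tail with
  | [] => edges
  | (a, b) :: rest => if a > hi then edges else pvLoopA rest hi (edges ++ [(a, min b hi)])

def default_rebin_edges (N : Int) (k_cap : Int) : List (Int × Int) :=
  let hi := min N k_cap
  let edges := (PySem.List.pyRange 0 (min 21 (hi + 1)) 1).map (fun k => (k, k))
  if hi ≤ 20 then edges
  else
    let tail : List (Int × Int) := [(21, 30), (31, 45), (46, 70), (71, 110), (111, 170), (171, 260), (261, hi)]
    let edges := pvLoopA tail hi edges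
    -- edges[-1] access / in-place replacement of the last element (edges is nonempty here; none is Python's IndexError, unreachable)
    match edges.getLast? with
    | none => edges
    | some (a, b) => if b ≠ hi then edges.dropLast ++ [(a, hi)] else edges

-- ===== PORT B =====
-- _start: start of the bin containing hi (loop over ascending boundaries keeping the last a ≤ hi)
def pvStart (hi : Int) : Int :=
  if hi ≤ 20 then hi
  else ([31, 46, 71, 111, 171, 261] : List Int).foldl (fun s a => if a ≤ hi then a else s) 21

-- cited by the recursion in pvBins for termination
theorem pvStart_bounds (hi : Int) (h : ¬ hi < 0) : 0 ≤ pvStart hi ∧ pvStart hi ≤ hi := by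
  unfold pvStart; simp only [List.foldl]; split_ifs <;> omega

-- _bins: all bins up to hi, built back-to-front by recursion on the containing bin
def pvBins (hi : Int) : List (Int × Int) :=
  if h : hi < 0 then []
  else pvBins (pvStart hi - 1) ++ [(pvStart hi, hi)]
termination_by (hi + 1).toNat
decreasing_by
  have := pvStart_bounds hi h
  omega

def default_rebin_edges_alt (N : Int) (k_cap : Int) : List (Int × Int) :=
  pvBins (min N k_cap)

-- ===== PRECONDITION & SPEC =====
def Spec_default_rebin_edges (N : Int) (k_cap : Int) (out : List (Int × Int)) : Prop := out = default_rebin_edges_alt N k_cap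
instance (N : Int) (k_cap : Int) (out : List (Int × Int)) : Decidable (Spec_default_rebin_edges N k_cap out) := by unfold Spec_default_rebin_edges; infer_instance

-- ===== CLAIM (what is proved, stated in full; the proofs are below) =====
def Claim_equal_default_rebin_edges : Prop := ∀ (N : Int) (k_cap : Int), Dom_default_rebin_edges N k_cap → Spec_default_rebin_edges N k_cap (default_rebin_edges N k_cap)

-- ===== LEMMAS AND PROOFS =====

-- Both ports depend on (N, k_cap) only through hi = min N k_cap; A's body as a function of hi.
def pvBodyA (hi : Int) : List (Int × Int) :=
  let edges := (PySem.List.pyRange 0 (min 21 (hi + 1)) 1).map (fun k => (k, k))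
  if hi ≤ 20 then edges
  else
    let tail : List (Int × Int) := [(21, 30), (31, 45), (46, 70), (71, 110), (111, 170), (171, 260), (261, hi)]
    let edges := pvLoopA tail hi edges
    match edges.getLast? with
    | none => edges
    | some (a, b) => if b ≠ hi then edges.dropLast ++ [(a, hi)] else edges

theorem pvA_eq_body (N k_cap : Int) : default_rebin_edges N k_cap = pvBodyA (min N k_cap) := rfl
theorem pvB_eq_body (N k_cap : Int) : default_rebin_edges_alt N k_cap = pvBins (min N k_cap) := rfl

theorem pvBodyA_neg (hi : Int) (h : hi < 0) : pvBodyA hi = [] := by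
  have h21 : min 21 (hi + 1) = hi + 1 := by omega
  have hr : PySem.List.pyRange 0 (hi + 1) 1 = [] := by
    simp [PySem.List.pyRange]; omega
  simp [pvBodyA, h21, hr, show hi ≤ 20 by omega]

theorem pvStart_big (hi : Int) (h : 261 ≤ hi) : pvStart hi = 261 := by
  unfold pvStart; simp only [List.foldl]; split_ifs <;> omega

-- A satisfies B's recurrence: decide for the 261 concrete values, symbolic evaluation above 261
set_option maxHeartbeats 2000000 in
theorem pvA_rec_small (hi : Int) (h0 : 0 ≤ hi) (h1 : hi < 261) :
    pvBodyA hi = pvBodyA (pvStart hi - 1) ++ [(pvStart hi, hi)] := by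
  interval_cases hi <;> decide

set_option maxHeartbeats 1000000 in
theorem pvA_rec_big (hi : Int) (h : 261 ≤ hi) :
    pvBodyA hi = pvBodyA 260 ++ [(261, hi)] := by
  have h21 : min 21 (hi + 1) = 21 := by omega
  have hrA : PySem.List.pyRange 0 21 1 = ([0,1,2,3,4,5,6,7,8,9,10,11,12,13,14,15,16,17,18,19,20] : List Int) := by decide
  have h260 : pvBodyA 260 =
      [(0,0),(1,1),(2,2),(3,3),(4,4),(5,5),(6,6),(7,7),(8,8),(9,9),(10,10),(11,11),(12,12),(13,13),(14,14),(15,15),(16,16),(17,17),(18,18),(19,19),(20,20),(21,30),(31,45),(46,70),(71,110),(111,170),(171,260)] := by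
    decide
  rw [h260]
  simp only [pvBodyA, h21, hrA, pvLoopA, List.map]
  norm_num [show ¬ hi ≤ 20 by omega, show ¬ (21:Int) > hi by omega, show ¬ (31:Int) > hi by omega,
    show ¬ (46:Int) > hi by omega, show ¬ (71:Int) > hi by omega, show ¬ (111:Int) > hi by omega,
    show ¬ (171:Int) > hi by omega, show ¬ (261:Int) > hi by omega,
    show min (30:Int) hi = 30 by omega, show min (45:Int) hi = 45 by omega,
    show min (70:Int) hi = 70 by omega, show min (110:Int) hi = 110 by omega,
    show min (170:Int) hi = 170 by omega, show min (260:Int) hi = 260 by omega,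
    show min hi hi = hi by omega]

theorem pvA_rec (hi : Int) (h0 : 0 ≤ hi) :
    pvBodyA hi = pvBodyA (pvStart hi - 1) ++ [(pvStart hi, hi)] := by
  rcases lt_or_ge hi 261 with h | h
  · exact pvA_rec_small hi h0 h
  · rw [pvStart_big hi h]
    exact pvA_rec_big hi h

theorem pvBins_eq_body (hi : Int) : pvBins hi = pvBodyA hi := by
  rw [pvBins]
  by_cases h : hi < 0
  · rw [dif_pos h, pvBodyA_neg hi h]
  · rw [dif_neg h, pvBins_eq_body (pvStart hi - 1), pvA_rec hi (by omega)]
termination_by (hi + 1).toNat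
decreasing_by
  have := pvStart_bounds hi h
  omega

-- ===== VERDICT (by name: the statement is the Claim_ definition above) =====
theorem default_rebin_edges_spec : Claim_equal_default_rebin_edges := by
  intro N k_cap _
  unfold Spec_default_rebin_edges
  rw [pvA_eq_body, pvB_eq_body, pvBins_eq_body]
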